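-- pv_equiv track=rewrite | github.com/GIST-DSLab/ARC_Prompt | Compositionality/tot/tasks/arc.py | X_line
-- ===== SOURCE A (Python) =====
-- import copy
--
-- def X_line(state, r, c, color, objects):
--     X_state = copy.deepcopy(state)
--     x_move={-1, 1}
--     y_move={-1, 1}
--
--     for i in x_move:
--         for j in y_move:
--             moved_x, moved_y = r + i, c + j
--             while 0 <= moved_x < len(state) and 0 <= moved_y < len(state[0]):
--                 X_state[moved_x][moved_y] = color
--                 moved_x+=i
--                 moved_y+=j
--
--     return X_state, objects
-- ===== SOURCE B (Python) =====
-- import copy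
--
-- def X_line(state, r, c, color, objects):
--     # Radius-first traversal: one loop over the diagonal distance d, painting
--     # all four in-bounds diagonal cells at that distance, stopping at the first
--     # radius where no diagonal cell is in bounds.
--     X_state = copy.deepcopy(state)
--     H = len(state)
--     W = len(state[0]) if state else 0
--     d = 1
--     while True:
--         hits = [(x, y)
--                 for x, y in ((r + d, c + d), (r + d, c - d), (r - d, c + d), (r - d, c - d))
--                 if 0 <= x < H and 0 <= y < W]
--         if not hits:
--             break
--         for x, y in hits:
--             X_state[x][y] = color
--         d += 1
--     return X_state, objects
-- ===== Notes on version B (the rewrite author's own statement) =====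
-- stated objective: alternative
-- what changed: A walks each of the four diagonal directions to exhaustion with nested direction loops and an inner while; B replaces them with a single loop over the diagonal radius d that paints all four in-bounds diagonal cells at distance d and stops at the first radius with no in-bounds cell.
import Mathlib
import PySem

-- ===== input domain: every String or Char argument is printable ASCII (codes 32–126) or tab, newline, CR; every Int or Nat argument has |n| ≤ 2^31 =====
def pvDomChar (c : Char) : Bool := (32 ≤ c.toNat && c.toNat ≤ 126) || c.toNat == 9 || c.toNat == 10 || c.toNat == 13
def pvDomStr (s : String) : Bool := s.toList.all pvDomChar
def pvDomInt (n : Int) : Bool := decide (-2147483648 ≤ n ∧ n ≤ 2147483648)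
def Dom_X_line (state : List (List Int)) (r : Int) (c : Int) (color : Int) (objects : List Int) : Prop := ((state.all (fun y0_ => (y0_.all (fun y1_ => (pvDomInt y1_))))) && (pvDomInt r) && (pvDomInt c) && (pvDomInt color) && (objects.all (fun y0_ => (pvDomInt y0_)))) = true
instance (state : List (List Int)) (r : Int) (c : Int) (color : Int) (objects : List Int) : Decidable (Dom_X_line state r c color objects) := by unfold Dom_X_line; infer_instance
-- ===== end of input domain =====

-- B reorganises A's four direction-walks into a single loop over the diagonal radius; equivalence of the
-- return value is proved (A mutates nothing observable: it writes only into its deepcopy).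

-- ===== PORT A =====
-- shared primitive: the Python statement `X_state[x][y] = color` for 0 ≤ x, 0 ≤ y
def pvSet2 (g : List (List Int)) (x y v : Int) : List (List Int) :=
  g.modify x.toNat (fun row => row.set y.toNat v)

-- the Python condition `0 <= x < H and 0 <= y < W`
def pvInb (H W x y : Int) : Bool := decide (0 ≤ x ∧ x < H ∧ 0 ≤ y ∧ y < W)

-- A's inner `while` walk along one diagonal direction (fuel `state.length + 1` strictly
-- dominates the walk length, so the recursion always stops by the guard, as in Python)
def pvRayA (H W color i j : Int) : Nat → Int → Int → List (List Int) → List (List Int)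
  | 0, _, _, g => g
  | fuel+1, x, y, g =>
    if pvInb H W x y then pvRayA H W color i j fuel (x + i) (y + j) (pvSet2 g x y color) else g

def X_line (state : List (List Int)) (r : Int) (c : Int) (color : Int) (objects : List Int) : List (List Int) × List Int :=
  let H : Int := state.length
  let W : Int := (state.headD []).length
  -- for i in {-1,1}: for j in {-1,1}: walk from (r+i, c+j); the write set is direction-disjoint,
  -- so the set-iteration order is irrelevant; fixed here as [1, -1]
  let X := [(1 : Int), -1].foldl (fun g i =>
      [(1 : Int), -1].foldl (fun g j =>
        pvRayA H W color i j (state.length + 1) (r + i) (c + j) g) g) state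
  (X, objects)

-- ===== PORT B =====
-- the in-bounds diagonal cells at radius d (Python's `hits` comprehension)
def pvHits (H W r c d : Int) : List (Int × Int) :=
  [(r + d, c + d), (r + d, c - d), (r - d, c + d), (r - d, c - d)].filter
    (fun p => pvInb H W p.1 p.2)

-- B's radius loop: paint all hits at radius d, stop at the first empty radius
-- (fuel `state.length + 1` dominates the number of productive radii)
def pvRadB (H W r c color : Int) : Nat → Int → List (List Int) → List (List Int)
  | 0, _, g => g
  | fuel+1, d, g =>
    let hits := pvHits H W r c d
    if hits.isEmpty then g
    else pvRadB H W r c color fuel (d + 1) (hits.foldl (fun g p => pvSet2 g p.1 p.2 color) g)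

def X_line_alt (state : List (List Int)) (r : Int) (c : Int) (color : Int) (objects : List Int) : List (List Int) × List Int :=
  let H : Int := state.length
  let W : Int := if state.isEmpty then 0 else (state.headD []).length
  (pvRadB H W r c color (state.length + 1) 1 state, objects)

-- ===== PRECONDITION & SPEC =====
-- Prop form of the bound test (used by Pre_ and the lemmas below)
def pvInbP (H W x y : Int) : Prop := 0 ≤ x ∧ x < H ∧ 0 ≤ y ∧ y < W

-- Pre_ admits grids whose rows are all at least as long as row 0 (then no write can go past a
-- row's end), and also any input whose four radius-1 diagonal neighbours are already out of
-- bounds (then nothing is ever written); it excludes the remaining ragged grids, on which a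
-- diagonal write `X_state[x][y] = color` can raise IndexError (A still returns on some of them,
-- when every ray happens to touch only rows at least as long as row 0).
def Pre_X_line (state : List (List Int)) (r : Int) (c : Int) (color : Int) (objects : List Int) : Prop :=
  state = [] ∨ (∀ row ∈ state, (state.headD []).length ≤ row.length) ∨
    (¬ pvInbP (state.length : Int) ((state.headD []).length : Int) (r + 1) (c + 1) ∧
     ¬ pvInbP (state.length : Int) ((state.headD []).length : Int) (r + 1) (c - 1) ∧
     ¬ pvInbP (state.length : Int) ((state.headD []).length : Int) (r - 1) (c + 1) ∧
     ¬ pvInbP (state.length : Int) ((state.headD []).length : Int) (r - 1) (c - 1))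
instance (state : List (List Int)) (r : Int) (c : Int) (color : Int) (objects : List Int) : Decidable (Pre_X_line state r c color objects) := by unfold Pre_X_line pvInbP; infer_instance

def pvWitness_X_line : List (List Int) × Int × Int × Int × List Int := ([[0, 0], [0, 0]], 0, 0, 5, [1])

def Spec_X_line (state : List (List Int)) (r : Int) (c : Int) (color : Int) (objects : List Int) (out : List (List Int) × List Int) : Prop := out = X_line_alt state r c color objects
instance (state : List (List Int)) (r : Int) (c : Int) (color : Int) (objects : List Int) (out : List (List Int) × List Int) : Decidable (Spec_X_line state r c color objects out) := by unfold Spec_X_line; infer_instance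

-- ===== CLAIM (what is proved, stated in full; the proofs are below) =====
def Claim_equal_X_line : Prop := ∀ (state : List (List Int)) (r : Int) (c : Int) (color : Int) (objects : List Int), Dom_X_line state r c color objects → Pre_X_line state r c color objects → Spec_X_line state r c color objects (X_line state r c color objects)

-- ===== LEMMAS AND PROOFS =====

-- Both loops only ever write `color`; abstract them as folds of single-cell writes over a cell list.
def pvWrite (color : Int) (g : List (List Int)) (l : List (Int × Int)) : List (List Int) :=
  l.foldl (fun g p => pvSet2 g p.1 p.2 color) g

def pvCellsA (H W i j : Int) : Nat → Int → Int → List (Int × Int)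
  | 0, _, _ => []
  | fuel+1, x, y => if pvInb H W x y then (x, y) :: pvCellsA H W i j fuel (x + i) (y + j) else []

def pvCellsB (H W r c : Int) : Nat → Int → List (Int × Int)
  | 0, _ => []
  | fuel+1, d =>
    if (pvHits H W r c d).isEmpty then []
    else pvHits H W r c d ++ pvCellsB H W r c fuel (d + 1)

theorem pvWrite_append (color : Int) (g : List (List Int)) (l1 l2 : List (Int × Int)) :
    pvWrite color (pvWrite color g l1) l2 = pvWrite color g (l1 ++ l2) := by
  simp [pvWrite, List.foldl_append]

theorem rayA_write (H W color i j : Int) : ∀ (fuel : Nat) (x y : Int) (g : List (List Int)),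
    pvRayA H W color i j fuel x y g = pvWrite color g (pvCellsA H W i j fuel x y) := by
  intro fuel
  induction fuel with
  | zero => intro x y g; simp [pvRayA, pvCellsA, pvWrite]
  | succ n ih =>
    intro x y g
    simp only [pvRayA, pvCellsA]
    by_cases h : pvInb H W x y = true
    · simp [h, ih, pvWrite]
    · simp [h, pvWrite]

theorem radB_write (H W r c color : Int) : ∀ (fuel : Nat) (d : Int) (g : List (List Int)),
    pvRadB H W r c color fuel d g = pvWrite color g (pvCellsB H W r c fuel d) := by
  intro fuel
  induction fuel with
  | zero => intro d g; simp [pvRadB, pvCellsB, pvWrite]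
  | succ n ih =>
    intro d g
    simp only [pvRadB, pvCellsB]
    by_cases h : (pvHits H W r c d).isEmpty
    · simp [h, pvWrite]
    · simp only [h, if_neg, Bool.false_eq_true, not_false_eq_true, ite_false]
      rw [ih, ← pvWrite_append]
      rfl

-- pointwise semantics of grids
def pvEnt (g : List (List Int)) (a b : Nat) : Option Int := g[a]?.bind (fun row => row[b]?)

def pvRowLen (g : List (List Int)) (a : Nat) : Nat := (g[a]?.getD []).length

def pvCellOK (g : List (List Int)) (p : Int × Int) : Prop :=
  0 ≤ p.1 ∧ 0 ≤ p.2 ∧ p.1.toNat < g.length ∧ p.2.toNat < pvRowLen g p.1.toNat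

theorem length_set2 (g : List (List Int)) (x y v : Int) : (pvSet2 g x y v).length = g.length := by
  simp [pvSet2]

theorem rowlen_set2 (g : List (List Int)) (x y v : Int) (a : Nat) :
    pvRowLen (pvSet2 g x y v) a = pvRowLen g a := by
  simp only [pvRowLen, pvSet2, List.getElem?_modify]
  cases g[a]? <;> simp <;> split <;> simp [List.length_set]

theorem ent_set2 (g : List (List Int)) (x y v : Int) (a b : Nat) :
    pvEnt (pvSet2 g x y v) a b =
      if a = x.toNat ∧ b = y.toNat ∧ x.toNat < g.length ∧ y.toNat < pvRowLen g x.toNat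
      then some v else pvEnt g a b := by
  simp only [pvEnt, pvSet2, pvRowLen, List.getElem?_modify]
  rcases h : g[a]? with _ | row
  · have hlen : g.length ≤ a := by simpa [List.getElem?_eq_none_iff] using h
    by_cases hax : a = x.toNat
    · subst hax
      rw [if_neg (by rintro ⟨-, -, hlt, -⟩; omega)]
      simp [pvEnt, h]
    · simp [pvEnt, h, hax]
  · have hlt : a < g.length := (List.getElem?_eq_some_iff.mp h).1
    by_cases hax : a = x.toNat
    · subst hax
      have hrl : (g[x.toNat]?.getD []).length = row.length := by simp [h]
      simp only [if_pos rfl, ite_true, eq_self_iff_true, true_and, hrl]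
      have hmap : (((fun a => a.set y.toNat v) <$> some row).bind fun a => a[b]?) = (row.set y.toNat v)[b]? := rfl
      rw [hmap, List.getElem?_set]
      by_cases hby : b = y.toNat
      · subst hby
        by_cases hyr : y.toNat < row.length
        · simp [hyr, hlt, pvEnt, h]
        · rw [if_pos rfl, if_neg (by omega), if_neg (by rintro ⟨-, -, hh⟩; omega)]
          simp [List.getElem?_eq_none_iff]
          omega
      · rw [if_neg (by omega), if_neg (by rintro ⟨h1, -⟩; exact hby h1)]
        simp [pvEnt, h]
    · simp only [if_neg (show ¬ x.toNat = a by omega), ite_false]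
      rw [if_neg (by rintro ⟨h1, -⟩; exact hax h1)]
      simp [pvEnt, h]

theorem length_write (color : Int) : ∀ (l : List (Int × Int)) (g : List (List Int)),
    (pvWrite color g l).length = g.length := by
  intro l
  induction l with
  | nil => intro g; simp [pvWrite]
  | cons p t ih => intro g; simp [pvWrite] at ih ⊢; rw [ih, length_set2]

theorem ent_write (color : Int) : ∀ (l : List (Int × Int)) (g : List (List Int)),
    (∀ p ∈ l, pvCellOK g p) → ∀ (a b : Nat),
    pvEnt (pvWrite color g l) a b = if ((a : Int), (b : Int)) ∈ l then some color else pvEnt g a b := by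
  intro l
  induction l with
  | nil => intro g _ a b; simp [pvWrite]
  | cons p t ih =>
    intro g hok a b
    have hokp := hok p (by simp)
    have hok' : ∀ q ∈ t, pvCellOK (pvSet2 g p.1 p.2 color) q := by
      intro q hq
      have := hok q (by simp [hq])
      simpa [pvCellOK, length_set2, rowlen_set2] using this
    have : pvWrite color g (p :: t) = pvWrite color (pvSet2 g p.1 p.2 color) t := by
      simp [pvWrite]
    rw [this, ih _ hok' a b]
    by_cases hmt : ((a : Int), (b : Int)) ∈ t
    · simp [hmt]
    · rw [if_neg hmt, ent_set2]
      obtain ⟨h1, h2, h3, h4⟩ := hokp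
      by_cases hpe : p = ((a : Int), (b : Int))
      · rw [if_pos ⟨by simp [hpe], by simp [hpe], h3, h4⟩, if_pos (by simp [hpe.symm])]
      · have hcons : ¬ ((a : Int), (b : Int)) ∈ p :: t := by
          simp only [List.mem_cons]
          rintro (hh | hh)
          · exact hpe hh.symm
          · exact hmt hh
        rw [if_neg hcons, if_neg]
        rintro ⟨ha, hb, -, -⟩
        apply hpe
        have e1 : p.1 = (a : Int) := by omega
        have e2 : p.2 = (b : Int) := by omega
        exact Prod.ext e1 e2

theorem grid_ext (g1 g2 : List (List Int)) (hl : g1.length = g2.length)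
    (he : ∀ a b : Nat, pvEnt g1 a b = pvEnt g2 a b) : g1 = g2 := by
  apply List.ext_getElem?
  intro a
  rcases h1 : g1[a]? with _ | row1
  · have : g1.length ≤ a := by simpa [List.getElem?_eq_none_iff] using h1
    symm; rw [List.getElem?_eq_none_iff]; omega
  · have ha : a < g1.length := (List.getElem?_eq_some_iff.mp h1).1
    rcases h2 : g2[a]? with _ | row2
    · have : g2.length ≤ a := by simpa [List.getElem?_eq_none_iff] using h2
      omega
    · congr 1
      apply List.ext_getElem?
      intro b
      have := he a b
      simpa [pvEnt, h1, h2] using this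

theorem pvInb_iff (H W x y : Int) : pvInb H W x y = true ↔ pvInbP H W x y := by
  simp [pvInb, pvInbP]

-- membership in A's per-direction cell list, as an arithmetic condition
theorem memA (H W i j : Int) : ∀ (fuel : Nat) (x y : Int) (p : Int × Int),
    p ∈ pvCellsA H W i j fuel x y ↔
      ∃ t : Int, 0 ≤ t ∧ t < (fuel : Int) ∧
        (∀ s : Int, 0 ≤ s → s ≤ t → pvInbP H W (x + i * s) (y + j * s)) ∧
        p = (x + i * t, y + j * t) := by
  intro fuel
  induction fuel with
  | zero =>
    intro x y p
    simp only [pvCellsA, List.not_mem_nil, false_iff]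
    rintro ⟨t, ht0, htf, -, -⟩
    simp at htf; omega
  | succ n ih =>
    intro x y p
    simp only [pvCellsA]
    by_cases h : pvInb H W x y = true
    · rw [if_pos h]
      have hxy : pvInbP H W x y := (pvInb_iff _ _ _ _).mp h
      simp only [List.mem_cons, ih]
      constructor
      · rintro (rfl | ⟨t, ht0, htf, hpre, rfl⟩)
        · exact ⟨0, le_refl 0, by positivity, fun s hs0 hs1 => by
            have : s = 0 := le_antisymm hs1 hs0
            subst this; simpa using hxy, by simp⟩
        · refine ⟨t + 1, by omega, by push_cast; omega, fun s hs0 hs1 => ?_, by simp only [Prod.mk.injEq]; constructor <;> ring⟩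
          rcases eq_or_lt_of_le hs0 with hs | hs
          · subst hs; simpa using hxy
          · have := hpre (s - 1) (by omega) (by omega)
            have e1 : x + i + i * (s - 1) = x + i * s := by ring
            have e2 : y + j + j * (s - 1) = y + j * s := by ring
            rwa [e1, e2] at this
      · rintro ⟨t, ht0, htf, hpre, rfl⟩
        rcases eq_or_lt_of_le ht0 with ht | ht
        · left; subst ht; simp
        · right
          refine ⟨t - 1, by omega, by push_cast at htf ⊢; omega, fun s hs0 hs1 => ?_, ?_⟩
          · have := hpre (s + 1) (by omega) (by omega)
            have e1 : x + i * (s + 1) = x + i + i * s := by ring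
            have e2 : y + j * (s + 1) = y + j + j * s := by ring
            rwa [e1, e2] at this
          · simp only [Prod.mk.injEq]; constructor <;> ring
    · rw [if_neg h]
      simp only [List.not_mem_nil, false_iff]
      rintro ⟨t, ht0, htf, hpre, -⟩
      have := hpre 0 (le_refl 0) ht0
      simp only [mul_zero, add_zero] at this
      exact h ((pvInb_iff _ _ _ _).mpr this)

theorem memA' (H W i j r c : Int) (fuel : Nat) (p : Int × Int) :
    p ∈ pvCellsA H W i j fuel (r + i) (c + j) ↔
      ∃ d : Int, 1 ≤ d ∧ d ≤ (fuel : Int) ∧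
        (∀ e : Int, 1 ≤ e → e ≤ d → pvInbP H W (r + i * e) (c + j * e)) ∧
        p = (r + i * d, c + j * d) := by
  rw [memA]
  constructor
  · rintro ⟨t, ht0, htf, hpre, rfl⟩
    refine ⟨t + 1, by omega, by omega, fun e he1 hed => ?_, by simp only [Prod.mk.injEq]; constructor <;> ring⟩
    have := hpre (e - 1) (by omega) (by omega)
    have e1 : r + i + i * (e - 1) = r + i * e := by ring
    have e2 : c + j + j * (e - 1) = c + j * e := by ring
    rwa [e1, e2] at this
  · rintro ⟨d, hd1, hdf, hpre, rfl⟩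
    refine ⟨d - 1, by omega, by omega, fun s hs0 hs1 => ?_, ?_⟩
    · have := hpre (s + 1) (by omega) (by omega)
      have e1 : r + i * (s + 1) = r + i + i * s := by ring
      have e2 : c + j * (s + 1) = c + j + j * s := by ring
      rwa [e1, e2] at this
    · simp only [Prod.mk.injEq]; constructor <;> ring

theorem mem_hits (H W r c e : Int) (p : Int × Int) :
    p ∈ pvHits H W r c e ↔
      ∃ i j : Int, (i = 1 ∨ i = -1) ∧ (j = 1 ∨ j = -1) ∧
        pvInbP H W (r + i * e) (c + j * e) ∧ p = (r + i * e, c + j * e) := by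
  simp only [pvHits, List.mem_filter, List.mem_cons, List.not_mem_nil, or_false, pvInb_iff]
  constructor
  · rintro ⟨(rfl | rfl | rfl | rfl), hb⟩
    · exact ⟨1, 1, Or.inl rfl, Or.inl rfl,
        by rw [show r + 1 * e = r + e by ring, show c + 1 * e = c + e by ring]; exact hb,
        by simp only [Prod.mk.injEq]; constructor <;> ring⟩
    · exact ⟨1, -1, Or.inl rfl, Or.inr rfl,
        by rw [show r + 1 * e = r + e by ring, show c + -1 * e = c - e by ring]; exact hb,
        by simp only [Prod.mk.injEq]; constructor <;> ring⟩
    · exact ⟨-1, 1, Or.inr rfl, Or.inl rfl,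
        by rw [show r + -1 * e = r - e by ring, show c + 1 * e = c + e by ring]; exact hb,
        by simp only [Prod.mk.injEq]; constructor <;> ring⟩
    · exact ⟨-1, -1, Or.inr rfl, Or.inr rfl,
        by rw [show r + -1 * e = r - e by ring, show c + -1 * e = c - e by ring]; exact hb,
        by simp only [Prod.mk.injEq]; constructor <;> ring⟩
  · rintro ⟨i, j, (rfl | rfl), (rfl | rfl), hb, rfl⟩
    · exact ⟨Or.inl (by simp only [Prod.mk.injEq]; constructor <;> ring), hb⟩
    · exact ⟨Or.inr (Or.inl (by simp only [Prod.mk.injEq]; constructor <;> ring)), hb⟩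
    · exact ⟨Or.inr (Or.inr (Or.inl (by simp only [Prod.mk.injEq]; constructor <;> ring))), hb⟩
    · exact ⟨Or.inr (Or.inr (Or.inr (by simp only [Prod.mk.injEq]; constructor <;> ring))), hb⟩

theorem memB (H W r c : Int) : ∀ (fuel : Nat) (d : Int) (p : Int × Int),
    p ∈ pvCellsB H W r c fuel d ↔
      ∃ t : Int, 0 ≤ t ∧ t < (fuel : Int) ∧
        (∀ s : Int, 0 ≤ s → s < t → pvHits H W r c (d + s) ≠ []) ∧
        p ∈ pvHits H W r c (d + t) := by
  intro fuel
  induction fuel with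
  | zero =>
    intro d p
    simp only [pvCellsB, List.not_mem_nil, false_iff]
    rintro ⟨t, ht0, htf, -, -⟩
    simp at htf; omega
  | succ n ih =>
    intro d p
    simp only [pvCellsB]
    by_cases h : (pvHits H W r c d).isEmpty
    · rw [if_pos h]
      have hnil : pvHits H W r c d = [] := List.isEmpty_iff.mp h
      simp only [List.not_mem_nil, false_iff]
      rintro ⟨t, ht0, htf, halive, hmem⟩
      rcases eq_or_lt_of_le ht0 with ht | ht
      · subst ht; simp only [add_zero] at hmem; rw [hnil] at hmem; exact List.not_mem_nil hmem
      · exact halive 0 (le_refl 0) ht (by simpa using hnil)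
    · rw [if_neg h]
      have hne : pvHits H W r c d ≠ [] := fun hh => h (by simp [hh])
      simp only [List.mem_append, ih]
      constructor
      · rintro (hm | ⟨t, ht0, htf, halive, hmem⟩)
        · exact ⟨0, le_refl 0, by positivity, by omega, by simpa using hm⟩
        · refine ⟨t + 1, by omega, by push_cast; omega, fun s hs0 hs1 => ?_, by
            have e : d + 1 + t = d + (t + 1) := by ring
            rwa [e] at hmem⟩
          rcases eq_or_lt_of_le hs0 with hs | hs
          · subst hs; simpa using hne
          · have := halive (s - 1) (by omega) (by omega)
            have e : d + 1 + (s - 1) = d + s := by ring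
            rwa [e] at this
      · rintro ⟨t, ht0, htf, halive, hmem⟩
        rcases eq_or_lt_of_le ht0 with ht | ht
        · left; subst ht; simpa using hmem
        · right
          refine ⟨t - 1, by omega, by push_cast at htf ⊢; omega, fun s hs0 hs1 => ?_, ?_⟩
          · have := halive (s + 1) (by omega) (by omega)
            have e : d + (s + 1) = d + 1 + s := by ring
            rwa [e] at this
          · have e : d + t = d + 1 + (t - 1) := by ring
            rwa [e] at hmem

theorem blocker (H W r c i j d e : Int) (hi : i = 1 ∨ i = -1) (hj : j = 1 ∨ j = -1)
    (he : 1 ≤ e) (hed : e ≤ d)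
    (hd : pvInbP H W (r + i * d) (c + j * d)) (hne : ¬ pvInbP H W (r + i * e) (c + j * e)) :
    ∀ i' j' : Int, (i' = 1 ∨ i' = -1) → (j' = 1 ∨ j' = -1) →
      ¬ pvInbP H W (r + i' * e) (c + j' * e) := by
  rintro i' j' hi' hj' hb
  unfold pvInbP at hd hne hb
  rcases hi with rfl | rfl <;> rcases hj with rfl | rfl <;>
    rcases hi' with rfl | rfl <;> rcases hj' with rfl | rfl <;>
    simp only [one_mul, neg_mul] at hd hne hb <;> omega

theorem core (H W r c i j d : Int) (hi : i = 1 ∨ i = -1) (hj : j = 1 ∨ j = -1) (hd : 1 ≤ d) :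
    (∀ e : Int, 1 ≤ e → e ≤ d → pvInbP H W (r + i * e) (c + j * e)) ↔
      (pvInbP H W (r + i * d) (c + j * d) ∧
        ∀ e : Int, 1 ≤ e → e < d → pvHits H W r c e ≠ []) := by
  constructor
  · intro hpre
    refine ⟨hpre d hd (le_refl d), fun e he1 hed => ?_⟩
    have hm : (r + i * e, c + j * e) ∈ pvHits H W r c e :=
      (mem_hits H W r c e _).mpr ⟨i, j, hi, hj, hpre e he1 (by omega), rfl⟩
    intro hnil
    rw [hnil] at hm
    exact List.not_mem_nil hm
  · rintro ⟨hvd, halive⟩ e he1 hed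
    by_contra hne
    have hblock := blocker H W r c i j d e hi hj he1 hed hvd hne
    have hlt : e < d := by
      rcases eq_or_lt_of_le hed with rfl | h
      · exact absurd hvd hne
      · exact h
    have := halive e he1 hlt
    apply this
    rcases hx : pvHits H W r c e with _ | ⟨q, t⟩
    · rfl
    · exfalso
      have hq : q ∈ pvHits H W r c e := by rw [hx]; simp
      obtain ⟨i', j', hi', hj', hb, -⟩ := (mem_hits H W r c e q).mp hq
      exact hblock i' j' hi' hj' hb

theorem cells_eq (H W r c : Int) (fuel : Nat) (p : Int × Int) :
    (p ∈ pvCellsA H W 1 1 fuel (r + 1) (c + 1) ∨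
     p ∈ pvCellsA H W 1 (-1) fuel (r + 1) (c - 1) ∨
     p ∈ pvCellsA H W (-1) 1 fuel (r - 1) (c + 1) ∨
     p ∈ pvCellsA H W (-1) (-1) fuel (r - 1) (c - 1)) ↔
    p ∈ pvCellsB H W r c fuel 1 := by
  have hB : p ∈ pvCellsB H W r c fuel 1 ↔
      ∃ d : Int, 1 ≤ d ∧ d ≤ (fuel : Int) ∧
        (∀ e : Int, 1 ≤ e → e < d → pvHits H W r c e ≠ []) ∧ p ∈ pvHits H W r c d := by
    rw [memB]
    constructor
    · rintro ⟨t, ht0, htf, halive, hmem⟩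
      refine ⟨1 + t, by omega, by omega, fun e he1 hed => ?_, hmem⟩
      have := halive (e - 1) (by omega) (by omega)
      rwa [show (1 : Int) + (e - 1) = e by ring] at this
    · rintro ⟨d, hd1, hdf, halive, hmem⟩
      refine ⟨d - 1, by omega, by omega, fun s hs0 hs1 => ?_, by rwa [show (1 : Int) + (d - 1) = d by ring]⟩
      have := halive (1 + s) (by omega) (by omega)
      exact this
  have hA1 := memA' H W 1 1 r c fuel p
  have hA2 : p ∈ pvCellsA H W 1 (-1) fuel (r + 1) (c - 1) ↔
      ∃ d : Int, 1 ≤ d ∧ d ≤ (fuel : Int) ∧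
        (∀ e : Int, 1 ≤ e → e ≤ d → pvInbP H W (r + 1 * e) (c + -1 * e)) ∧
        p = (r + 1 * d, c + -1 * d) := by
    have := memA' H W 1 (-1) r c fuel p
    rwa [show c + -1 = c - 1 by ring] at this
  have hA3 : p ∈ pvCellsA H W (-1) 1 fuel (r - 1) (c + 1) ↔
      ∃ d : Int, 1 ≤ d ∧ d ≤ (fuel : Int) ∧
        (∀ e : Int, 1 ≤ e → e ≤ d → pvInbP H W (r + -1 * e) (c + 1 * e)) ∧
        p = (r + -1 * d, c + 1 * d) := by
    have := memA' H W (-1) 1 r c fuel p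
    rwa [show r + -1 = r - 1 by ring] at this
  have hA4 : p ∈ pvCellsA H W (-1) (-1) fuel (r - 1) (c - 1) ↔
      ∃ d : Int, 1 ≤ d ∧ d ≤ (fuel : Int) ∧
        (∀ e : Int, 1 ≤ e → e ≤ d → pvInbP H W (r + -1 * e) (c + -1 * e)) ∧
        p = (r + -1 * d, c + -1 * d) := by
    have := memA' H W (-1) (-1) r c fuel p
    rwa [show r + -1 = r - 1 by ring, show c + -1 = c - 1 by ring] at this
  rw [hB, hA1, hA2, hA3, hA4]
  constructor
  · rintro (⟨d, hd1, hdf, hpre, rfl⟩ | ⟨d, hd1, hdf, hpre, rfl⟩ | ⟨d, hd1, hdf, hpre, rfl⟩ | ⟨d, hd1, hdf, hpre, rfl⟩)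
    · exact ⟨d, hd1, hdf, ((core H W r c 1 1 d (Or.inl rfl) (Or.inl rfl) hd1).mp hpre).2,
        (mem_hits H W r c d _).mpr ⟨1, 1, Or.inl rfl, Or.inl rfl,
          ((core H W r c 1 1 d (Or.inl rfl) (Or.inl rfl) hd1).mp hpre).1, rfl⟩⟩
    · exact ⟨d, hd1, hdf, ((core H W r c 1 (-1) d (Or.inl rfl) (Or.inr rfl) hd1).mp hpre).2,
        (mem_hits H W r c d _).mpr ⟨1, -1, Or.inl rfl, Or.inr rfl,
          ((core H W r c 1 (-1) d (Or.inl rfl) (Or.inr rfl) hd1).mp hpre).1, rfl⟩⟩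
    · exact ⟨d, hd1, hdf, ((core H W r c (-1) 1 d (Or.inr rfl) (Or.inl rfl) hd1).mp hpre).2,
        (mem_hits H W r c d _).mpr ⟨-1, 1, Or.inr rfl, Or.inl rfl,
          ((core H W r c (-1) 1 d (Or.inr rfl) (Or.inl rfl) hd1).mp hpre).1, rfl⟩⟩
    · exact ⟨d, hd1, hdf, ((core H W r c (-1) (-1) d (Or.inr rfl) (Or.inr rfl) hd1).mp hpre).2,
        (mem_hits H W r c d _).mpr ⟨-1, -1, Or.inr rfl, Or.inr rfl,
          ((core H W r c (-1) (-1) d (Or.inr rfl) (Or.inr rfl) hd1).mp hpre).1, rfl⟩⟩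
  · rintro ⟨d, hd1, hdf, halive, hmem⟩
    obtain ⟨i, j, hi, hj, hb, rfl⟩ := (mem_hits H W r c d _).mp hmem
    have hpre := (core H W r c i j d hi hj hd1).mpr ⟨hb, halive⟩
    rcases hi with rfl | rfl <;> rcases hj with rfl | rfl
    · exact Or.inl ⟨d, hd1, hdf, hpre, rfl⟩
    · exact Or.inr (Or.inl ⟨d, hd1, hdf, hpre, rfl⟩)
    · exact Or.inr (Or.inr (Or.inl ⟨d, hd1, hdf, hpre, rfl⟩))
    · exact Or.inr (Or.inr (Or.inr ⟨d, hd1, hdf, hpre, rfl⟩))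

theorem cellsA_inb (H W i j : Int) : ∀ (fuel : Nat) (x y : Int) (p : Int × Int),
    p ∈ pvCellsA H W i j fuel x y → pvInbP H W p.1 p.2 := by
  intro fuel
  induction fuel with
  | zero => intro x y p hp; simp [pvCellsA] at hp
  | succ n ih =>
    intro x y p hp
    simp only [pvCellsA] at hp
    by_cases h : pvInb H W x y = true
    · rw [if_pos h] at hp
      rcases List.mem_cons.mp hp with rfl | hp
      · exact (pvInb_iff _ _ _ _).mp h
      · exact ih _ _ _ hp
    · rw [if_neg h] at hp; simp at hp

theorem cellsB_inb (H W r c : Int) : ∀ (fuel : Nat) (d : Int) (p : Int × Int),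
    p ∈ pvCellsB H W r c fuel d → pvInbP H W p.1 p.2 := by
  intro fuel
  induction fuel with
  | zero => intro d p hp; simp [pvCellsB] at hp
  | succ n ih =>
    intro d p hp
    simp only [pvCellsB] at hp
    by_cases h : (pvHits H W r c d).isEmpty
    · rw [if_pos h] at hp; simp at hp
    · rw [if_neg h] at hp
      rcases List.mem_append.mp hp with hp | hp
      · exact (pvInb_iff _ _ _ _).mp (List.mem_filter.mp hp).2
      · exact ih _ _ hp

theorem rowlen_ge (state : List (List Int))
    (hpre : state = [] ∨ ∀ row ∈ state, (state.headD []).length ≤ row.length)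
    (a : Nat) (ha : a < state.length) : (state.headD []).length ≤ pvRowLen state a := by
  rcases hpre with rfl | hpre
  · simp at ha
  · have hsome : state[a]? = some state[a] := List.getElem?_eq_getElem ha
    rw [pvRowLen, hsome]
    exact hpre _ (List.getElem_mem ha)

theorem cellok_of_inb (state : List (List Int))
    (hpre : state = [] ∨ ∀ row ∈ state, (state.headD []).length ≤ row.length)
    (p : Int × Int)
    (hb : pvInbP (state.length : Int) ((state.headD []).length : Int) p.1 p.2) :
    pvCellOK state p := by
  obtain ⟨h1, h2, h3, h4⟩ := hb
  have hlt : p.1.toNat < state.length := by omega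
  refine ⟨h1, h3, hlt, ?_⟩
  have := rowlen_ge state hpre p.1.toNat hlt
  omega

theorem main_grid_rect (state : List (List Int)) (r c color : Int)
    (hst : state ≠ [])
    (hrect : ∀ row ∈ state, (state.headD []).length ≤ row.length) :
    pvWrite color state
      (((pvCellsA (state.length : Int) ((state.headD []).length : Int) 1 1 (state.length + 1) (r + 1) (c + 1) ++
         pvCellsA (state.length : Int) ((state.headD []).length : Int) 1 (-1) (state.length + 1) (r + 1) (c - 1)) ++
        pvCellsA (state.length : Int) ((state.headD []).length : Int) (-1) 1 (state.length + 1) (r - 1) (c + 1)) ++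
       pvCellsA (state.length : Int) ((state.headD []).length : Int) (-1) (-1) (state.length + 1) (r - 1) (c - 1)) =
    pvWrite color state
      (pvCellsB (state.length : Int) (if state.isEmpty then 0 else ((state.headD []).length : Int)) r c
        (state.length + 1) 1) := by
  have hni : state.isEmpty = false := by
    rcases state with _ | _
    · exact absurd rfl hst
    · rfl
  have hW : (if state.isEmpty then 0 else ((state.headD []).length : Int)) = ((state.headD []).length : Int) := by
    rw [hni]; rfl
  rw [hW]
  have hmm : ∀ p : Int × Int,
      p ∈ (((pvCellsA (state.length : Int) ((state.headD []).length : Int) 1 1 (state.length + 1) (r + 1) (c + 1) ++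
            pvCellsA (state.length : Int) ((state.headD []).length : Int) 1 (-1) (state.length + 1) (r + 1) (c - 1)) ++
           pvCellsA (state.length : Int) ((state.headD []).length : Int) (-1) 1 (state.length + 1) (r - 1) (c + 1)) ++
          pvCellsA (state.length : Int) ((state.headD []).length : Int) (-1) (-1) (state.length + 1) (r - 1) (c - 1)) ↔
      p ∈ pvCellsB (state.length : Int) ((state.headD []).length : Int) r c (state.length + 1) 1 := by
    intro p
    rw [← cells_eq (state.length : Int) ((state.headD []).length : Int) r c (state.length + 1) p]
    simp only [List.mem_append]
    tauto
  have hokA : ∀ p ∈ (((pvCellsA (state.length : Int) ((state.headD []).length : Int) 1 1 (state.length + 1) (r + 1) (c + 1) ++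
            pvCellsA (state.length : Int) ((state.headD []).length : Int) 1 (-1) (state.length + 1) (r + 1) (c - 1)) ++
           pvCellsA (state.length : Int) ((state.headD []).length : Int) (-1) 1 (state.length + 1) (r - 1) (c + 1)) ++
          pvCellsA (state.length : Int) ((state.headD []).length : Int) (-1) (-1) (state.length + 1) (r - 1) (c - 1)),
      pvCellOK state p := by
    intro p hp
    simp only [List.mem_append] at hp
    rcases hp with ((hp | hp) | hp) | hp <;>
      exact cellok_of_inb state (Or.inr hrect) p (cellsA_inb _ _ _ _ _ _ _ p hp)
  have hokB : ∀ p ∈ pvCellsB (state.length : Int) ((state.headD []).length : Int) r c (state.length + 1) 1,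
      pvCellOK state p := by
    intro p hp
    exact cellok_of_inb state (Or.inr hrect) p (cellsB_inb _ _ r c _ _ p hp)
  apply grid_ext
  · rw [length_write, length_write]
  · intro a b
    rw [ent_write color _ state hokA a b, ent_write color _ state hokB a b]
    by_cases hm : ((a : Int), (b : Int)) ∈ pvCellsB (state.length : Int) ((state.headD []).length : Int) r c (state.length + 1) 1
    · rw [if_pos ((hmm _).mpr hm), if_pos hm]
    · rw [if_neg (fun hh => hm ((hmm _).mp hh)), if_neg hm]

theorem pvInb_false_of_not (H W x y : Int) (h : ¬ pvInbP H W x y) : pvInb H W x y = false := by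
  cases hb : pvInb H W x y
  · rfl
  · exact absurd ((pvInb_iff _ _ _ _).mp hb) h

theorem main_grid_far (state : List (List Int)) (r c color : Int)
    (hfar : ¬ pvInbP (state.length : Int) ((state.headD []).length : Int) (r + 1) (c + 1) ∧
      ¬ pvInbP (state.length : Int) ((state.headD []).length : Int) (r + 1) (c - 1) ∧
      ¬ pvInbP (state.length : Int) ((state.headD []).length : Int) (r - 1) (c + 1) ∧
      ¬ pvInbP (state.length : Int) ((state.headD []).length : Int) (r - 1) (c - 1)) :
    pvWrite color state
      (((pvCellsA (state.length : Int) ((state.headD []).length : Int) 1 1 (state.length + 1) (r + 1) (c + 1) ++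
         pvCellsA (state.length : Int) ((state.headD []).length : Int) 1 (-1) (state.length + 1) (r + 1) (c - 1)) ++
        pvCellsA (state.length : Int) ((state.headD []).length : Int) (-1) 1 (state.length + 1) (r - 1) (c + 1)) ++
       pvCellsA (state.length : Int) ((state.headD []).length : Int) (-1) (-1) (state.length + 1) (r - 1) (c - 1)) =
    pvWrite color state
      (pvCellsB (state.length : Int) (if state.isEmpty then 0 else ((state.headD []).length : Int)) r c
        (state.length + 1) 1) := by
  obtain ⟨hf1, hf2, hf3, hf4⟩ := hfar
  have h11 := pvInb_false_of_not _ _ _ _ hf1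
  have h12 := pvInb_false_of_not _ _ _ _ hf2
  have h21 := pvInb_false_of_not _ _ _ _ hf3
  have h22 := pvInb_false_of_not _ _ _ _ hf4
  have hWc : ∀ x y : Int,
      pvInb (state.length : Int) ((state.headD []).length : Int) x y = false →
      pvInb (state.length : Int) (if state.isEmpty then 0 else ((state.headD []).length : Int)) x y = false := by
    intro x y h
    by_cases he : state.isEmpty
    · rw [if_pos he]
      have hz : state.length = 0 := by
        rw [List.isEmpty_iff] at he
        simp [he]
      rw [hz]
      cases hb : pvInb ((0 : Nat) : Int) 0 x y
      · rfl
      · exfalso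
        obtain ⟨ha, hbb, -, -⟩ := (pvInb_iff _ _ _ _).mp hb
        simp at hbb
        omega
    · rw [if_neg he]
      exact h
  have h11' := hWc _ _ h11
  have h12' := hWc _ _ h12
  have h21' := hWc _ _ h21
  have h22' := hWc _ _ h22
  have eA1 : pvCellsA (state.length : Int) ((state.headD []).length : Int) 1 1 (state.length + 1) (r + 1) (c + 1) = [] := by
    simp only [pvCellsA]
    rw [h11]
    simp
  have eA2 : pvCellsA (state.length : Int) ((state.headD []).length : Int) 1 (-1) (state.length + 1) (r + 1) (c - 1) = [] := by
    simp only [pvCellsA]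
    rw [h12]
    simp
  have eA3 : pvCellsA (state.length : Int) ((state.headD []).length : Int) (-1) 1 (state.length + 1) (r - 1) (c + 1) = [] := by
    simp only [pvCellsA]
    rw [h21]
    simp
  have eA4 : pvCellsA (state.length : Int) ((state.headD []).length : Int) (-1) (-1) (state.length + 1) (r - 1) (c - 1) = [] := by
    simp only [pvCellsA]
    rw [h22]
    simp
  have hh : pvHits (state.length : Int) (if state.isEmpty then 0 else ((state.headD []).length : Int)) r c 1 = [] := by
    simp only [pvHits, List.filter_cons, List.filter_nil]
    simp only [h11', h12', h21', h22']
    simp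
  have eB : pvCellsB (state.length : Int) (if state.isEmpty then 0 else ((state.headD []).length : Int)) r c (state.length + 1) 1 = [] := by
    simp only [pvCellsB]
    rw [hh]
    simp
  rw [eA1, eA2, eA3, eA4, eB]
  simp

theorem main_grid (state : List (List Int)) (r c color : Int)
    (hpre : Pre_X_line state r c color [] ) :
    pvWrite color state
      (((pvCellsA (state.length : Int) ((state.headD []).length : Int) 1 1 (state.length + 1) (r + 1) (c + 1) ++
         pvCellsA (state.length : Int) ((state.headD []).length : Int) 1 (-1) (state.length + 1) (r + 1) (c - 1)) ++
        pvCellsA (state.length : Int) ((state.headD []).length : Int) (-1) 1 (state.length + 1) (r - 1) (c + 1)) ++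
       pvCellsA (state.length : Int) ((state.headD []).length : Int) (-1) (-1) (state.length + 1) (r - 1) (c - 1)) =
    pvWrite color state
      (pvCellsB (state.length : Int) (if state.isEmpty then 0 else ((state.headD []).length : Int)) r c
        (state.length + 1) 1) := by
  by_cases hst : state = []
  · subst hst
    have hLA : ∀ (i j : Int) (x y : Int) (p : Int × Int),
        p ∉ pvCellsA ((0 : Nat) : Int) ((([] : List (List Int)).headD []).length : Int) i j 1 x y := by
      intro i j x y p hp
      have := cellsA_inb _ _ i j 1 x y p hp
      obtain ⟨h1, h2, -, -⟩ := this
      simp at h2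
      omega
    have e1 : ∀ (i j : Int) (x y : Int),
        pvCellsA ((0 : Nat) : Int) ((([] : List (List Int)).headD []).length : Int) i j 1 x y = [] := by
      intro i j x y
      exact List.eq_nil_iff_forall_not_mem.mpr (fun p => hLA i j x y p)
    have e2 : pvCellsB ((0 : Nat) : Int)
        (if ([] : List (List Int)).isEmpty then 0 else ((([] : List (List Int)).headD []).length : Int)) r c 1 1 = [] := by
      apply List.eq_nil_iff_forall_not_mem.mpr
      intro p hp
      have := cellsB_inb _ _ r c 1 1 p hp
      obtain ⟨h1, h2, -, -⟩ := this
      omega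
    simp only [List.length_nil] at *
    rw [e1, e1, e1, e1, e2]
    simp
  · rcases hpre with rfl | hrect | hfar
    · exact absurd rfl hst
    · exact main_grid_rect state r c color hst hrect
    · exact main_grid_far state r c color hfar

-- ===== VERDICT (by name: the statement is the Claim_ definition above) =====
theorem X_line_spec : Claim_equal_X_line := by
  intro state r c color objects hdom hpre
  unfold Spec_X_line
  have hA : X_line state r c color objects =
      (pvWrite color state
        (pvCellsA (state.length : Int) ((state.headD []).length : Int) 1 1 (state.length + 1) (r + 1) (c + 1) ++
          (pvCellsA (state.length : Int) ((state.headD []).length : Int) 1 (-1) (state.length + 1) (r + 1) (c + -1) ++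
            (pvCellsA (state.length : Int) ((state.headD []).length : Int) (-1) 1 (state.length + 1) (r + -1) (c + 1) ++
              pvCellsA (state.length : Int) ((state.headD []).length : Int) (-1) (-1) (state.length + 1) (r + -1) (c + -1)))),
       objects) := by
    simp only [X_line, List.foldl]
    rw [rayA_write, rayA_write, rayA_write, rayA_write, pvWrite_append, pvWrite_append, pvWrite_append]
  have hB : X_line_alt state r c color objects =
      (pvWrite color state
        (pvCellsB (state.length : Int) (if state.isEmpty then 0 else ((state.headD []).length : Int)) r c
          (state.length + 1) 1),
       objects) := by
    simp only [X_line_alt]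
    rw [radB_write]
  rw [hA, hB]
  have er : r + -1 = r - 1 := by ring
  have ec : c + -1 = c - 1 := by ring
  rw [er, ec, ← List.append_assoc, ← List.append_assoc, main_grid state r c color hpre]
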